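-- pv_equiv track=rewrite | github.com/ericpitcock/epicenter-design-system | packages/epicenter-icons/scripts/generate_react_components.py | svg_filename_to_component_name
-- ===== SOURCE A (Python) =====
-- def svg_filename_to_component_name(filename):
--     """
--     Convert SVG filename to PascalCase React component name
--     Example: 1st-bracket-circle-stroke-standard.svg -> FirstBracketCircle
--     """
--     name = filename.replace('.svg', '').replace('-stroke-standard', '')
--
--     # Specific renames
--     naming_conflicts = {
--         'trade-mark': 'trademark-circle',
--         'trademark': 'trademark-rectangle',
--         'finger-print-scan': 'fingerprint-scan-01',
--         'fingerprint-scan': 'fingerprint-scan-02',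
--         'four-square': 'four-number-square',
--         'foursquare': 'foursquare-logo',
--     }
--     if name in naming_conflicts:
--         name = naming_conflicts[name]
--
--     special_chars = {
--         ':': 'Colon', '.': 'Dot', '+': 'Plus', '@': 'At', '#': 'Hash',
--         '$': 'Dollar', '%': 'Percent', '&': 'And', '!': 'Exclamation',
--         '?': 'Question', '*': 'Star', '/': 'Slash', '\\': 'Backslash',
--         '|': 'Pipe', '=': 'Equals', '<': 'Less', '>': 'Greater',
--         '(': 'ParenOpen', ')': 'ParenClose', '[': 'BracketOpen',
--         ']': 'BracketClose', '{': 'BraceOpen', '}': 'BraceClose',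
--         ';': 'Semicolon', ',': 'Comma', "'": 'Quote', '"': 'DoubleQuote',
--         '`': 'Backtick', '~': 'Tilde', '^': 'Caret'
--     }
--     for char, replacement in special_chars.items():
--         name = name.replace(char, f'-{replacement}')
--
--     if name and name[0].isdigit():
--         name = 'Num' + name
--
--     parts = [p for p in name.split('-') if p]
--     pascal_name = ''.join(word.capitalize() for word in parts)
--     return pascal_name
-- ===== SOURCE B (Python) =====
-- def svg_filename_to_component_name(filename):
--     """
--     Convert SVG filename to PascalCase React component name, in one pass:
--     instead of 29 full-string .replace() rescans, a single left-to-right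
--     traversal builds the word list directly, flushing the current word at each
--     hyphen separator and starting a new word at each special character
--     (spelled out by name).
--     """
--     name = filename.replace('.svg', '').replace('-stroke-standard', '')
--
--     naming_conflicts = {
--         'trade-mark': 'trademark-circle',
--         'trademark': 'trademark-rectangle',
--         'finger-print-scan': 'fingerprint-scan-01',
--         'fingerprint-scan': 'fingerprint-scan-02',
--         'four-square': 'four-number-square',
--         'foursquare': 'foursquare-logo',
--     }
--     name = naming_conflicts.get(name, name)
--
--     special_chars = {
--         ':': 'Colon', '.': 'Dot', '+': 'Plus', '@': 'At', '#': 'Hash',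
--         '$': 'Dollar', '%': 'Percent', '&': 'And', '!': 'Exclamation',
--         '?': 'Question', '*': 'Star', '/': 'Slash', '\\': 'Backslash',
--         '|': 'Pipe', '=': 'Equals', '<': 'Less', '>': 'Greater',
--         '(': 'ParenOpen', ')': 'ParenClose', '[': 'BracketOpen',
--         ']': 'BracketClose', '{': 'BraceOpen', '}': 'BraceClose',
--         ';': 'Semicolon', ',': 'Comma', "'": 'Quote', '"': 'DoubleQuote',
--         '`': 'Backtick', '~': 'Tilde', '^': 'Caret'
--     }
--
--     parts = []
--     cur = ''
--     for ch in name: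
--         if ch == '-':
--             if cur:
--                 parts.append(cur)
--             cur = ''
--         elif ch in special_chars:
--             if cur:
--                 parts.append(cur)
--             cur = special_chars[ch]
--         else:
--             cur += ch
--     if cur:
--         parts.append(cur)
--
--     if name and name[0].isdigit():
--         parts[0] = 'Num' + parts[0]
--
--     return ''.join(w[:1].upper() + w[1:].lower() for w in parts)
-- ===== Notes on version B (the rewrite author's own statement) =====
-- stated objective: alternative
-- what changed: The 29 sequential full-string str.replace rescans plus the later split are replaced by a single left-to-right character pass that builds the word list directly (flushing the current word at each hyphen separator and starting a new word at each special character), with the Num prefix applied to the first word instead of the whole string.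
import Mathlib
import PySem

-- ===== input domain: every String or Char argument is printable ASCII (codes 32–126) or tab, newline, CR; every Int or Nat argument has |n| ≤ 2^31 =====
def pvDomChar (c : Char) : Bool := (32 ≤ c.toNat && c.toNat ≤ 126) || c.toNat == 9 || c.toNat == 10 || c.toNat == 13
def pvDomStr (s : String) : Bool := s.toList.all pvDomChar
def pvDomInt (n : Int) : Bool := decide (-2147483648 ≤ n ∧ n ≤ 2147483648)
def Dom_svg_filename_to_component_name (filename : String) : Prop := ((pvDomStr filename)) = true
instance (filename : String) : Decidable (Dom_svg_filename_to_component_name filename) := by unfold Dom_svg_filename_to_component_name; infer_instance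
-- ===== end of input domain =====

-- B replaces A's 29 sequential full-string replace passes + split by ONE character pass building the word list directly; same return value (no side effects); objective: alternative.
-- ===== PORT A =====
-- the naming_conflicts dict (association list, literal order)
def pvConflicts : List (List Char × List Char) :=
  [("trade-mark".toList, "trademark-circle".toList),
   ("trademark".toList, "trademark-rectangle".toList),
   ("finger-print-scan".toList, "fingerprint-scan-01".toList),
   ("fingerprint-scan".toList, "fingerprint-scan-02".toList),
   ("four-square".toList, "four-number-square".toList),
   ("foursquare".toList, "foursquare-logo".toList)]

-- the special_chars dict (association list, literal order); keys are single chars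
def pvSpecials : List (Char × List Char) :=
  [(':', "Colon".toList), ('.', "Dot".toList), ('+', "Plus".toList), ('@', "At".toList), ('#', "Hash".toList), ('$', "Dollar".toList), ('%', "Percent".toList), ('&', "And".toList), ('!', "Exclamation".toList), ('?', "Question".toList), ('*', "Star".toList), ('/', "Slash".toList), ('\\', "Backslash".toList), ('|', "Pipe".toList), ('=', "Equals".toList), ('<', "Less".toList), ('>', "Greater".toList), ('(', "ParenOpen".toList), (')', "ParenClose".toList), ('[', "BracketOpen".toList), (']', "BracketClose".toList), ('{', "BraceOpen".toList), ('}', "BraceClose".toList), (';', "Semicolon".toList), (',', "Comma".toList), ('\'', "Quote".toList), ('\"', "DoubleQuote".toList), ('`', "Backtick".toList), ('~', "Tilde".toList), ('^', "Caret".toList)]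

-- word.capitalize() : first char uppercased, rest lowercased (exact on ASCII)
def pvCapA (w : List Char) : List Char :=
  match w with
  | [] => []
  | c :: t => PySem.Chars.upperChar c :: PySem.Chars.lower t

def svg_filename_to_component_name (filename : String) : String :=
  let name0 := PySem.Chars.replace (PySem.Chars.replace filename.toList ".svg".toList []) "-stroke-standard".toList []
  -- if name in naming_conflicts: name = naming_conflicts[name]
  let name1 := match pvConflicts.lookup name0 with | some v => v | none => name0
  -- for char, replacement in special_chars.items(): name = name.replace(char, '-' + replacement)
  let name2 := pvSpecials.foldl (fun nm p => PySem.Chars.replace nm [p.1] ('-' :: p.2)) name1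
  -- if name and name[0].isdigit(): name = 'Num' + name
  let name3 := if (match name2 with | [] => false | c :: _ => PySem.Chars.isdigit c) then "Num".toList ++ name2 else name2
  let parts := (PySem.Chars.splitOn name3 ['-']).filter (fun p => !p.isEmpty)
  String.mk (PySem.Chars.join [] (parts.map pvCapA))

-- ===== PORT B =====
-- w[:1].upper() + w[1:].lower()
def pvCapB (w : List Char) : List Char :=
  PySem.Chars.upper (w.take 1) ++ PySem.Chars.lower (w.drop 1)

-- the for-loop over the characters of name, with state (parts, cur)
def pvBLoop : List Char → List (List Char) → List Char → List (List Char)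
  | [], parts, cur => if cur.isEmpty then parts else parts ++ [cur]
  | c :: t, parts, cur =>
    if c = '-' then pvBLoop t (if cur.isEmpty then parts else parts ++ [cur]) []
    else
      match pvSpecials.lookup c with
      | some v => pvBLoop t (if cur.isEmpty then parts else parts ++ [cur]) v
      | none => pvBLoop t parts (cur ++ [c])

def svg_filename_to_component_name_alt (filename : String) : String :=
  let name0 := PySem.Chars.replace (PySem.Chars.replace filename.toList ".svg".toList []) "-stroke-standard".toList []
  -- name = naming_conflicts.get(name, name)
  let name := (pvConflicts.lookup name0).getD name0
  let parts0 := pvBLoop name [] []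
  -- if name and name[0].isdigit(): parts[0] = 'Num' + parts[0]
  -- (modifyHead is exact: when the guard holds, parts0 is nonempty, so parts[0] never raises)
  let parts := if (match name with | [] => false | c :: _ => PySem.Chars.isdigit c) then parts0.modifyHead ("Num".toList ++ ·) else parts0
  String.mk (PySem.Chars.join [] (parts.map pvCapB))

-- ===== PRECONDITION & SPEC =====
def Spec_svg_filename_to_component_name (filename : String) (out : String) : Prop := out = svg_filename_to_component_name_alt filename
instance (filename : String) (out : String) : Decidable (Spec_svg_filename_to_component_name filename out) := by unfold Spec_svg_filename_to_component_name; infer_instance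

-- ===== CLAIM (what is proved, stated in full; the proofs are below) =====
def Claim_equal_svg_filename_to_component_name : Prop := ∀ (filename : String), Dom_svg_filename_to_component_name filename → Spec_svg_filename_to_component_name filename (svg_filename_to_component_name filename)

-- ===== LEMMAS AND PROOFS =====

-- the per-character map that the 29 sequential replaces amount to
def pvG (c : Char) : List Char :=
  match pvSpecials.lookup c with | some v => '-' :: v | none => [c]

-- reference splitter on '-' (keeping empty pieces, as Python split does)
def pvSplit : List Char → List (List Char)
  | [] => [[]]
  | c :: t => if c = '-' then [] :: pvSplit t else (pvSplit t).modifyHead (c :: ·)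

theorem replace_go_single (c : Char) (r : List Char) :
    ∀ (fuel : Nat) (l acc : List Char), l.length ≤ fuel →
      PySem.Chars.replace.go [c] r fuel l acc
        = acc.reverse ++ l.flatMap (fun x => if x = c then r else [x]) := by
  intro fuel
  induction fuel with
  | zero =>
    intro l acc h
    have hl : l = [] := List.eq_nil_of_length_eq_zero (Nat.le_zero.mp h)
    subst hl
    simp [PySem.Chars.replace.go]
  | succ n ih =>
    intro l acc h
    cases l with
    | nil => simp [PySem.Chars.replace.go]
    | cons x t =>
      simp only [PySem.Chars.replace.go, List.isPrefixOf, Bool.and_true]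
      by_cases hx : c = x
      · subst hx
        simp only [beq_self_eq_true, if_true, List.length_cons, List.length_nil,
          List.drop_succ_cons, List.drop_zero, Nat.zero_add]
        rw [ih t (r.reverse ++ acc) (by simpa using Nat.le_of_succ_le_succ h)]
        simp
      · have : (c == x) = false := by simpa using hx
        rw [this]
        simp only [Bool.false_eq_true, if_false]
        rw [ih t (x :: acc) (by simpa using Nat.le_of_succ_le_succ h)]
        simp [Ne.symm hx]

theorem replace_single (l : List Char) (c : Char) (r : List Char) :
    PySem.Chars.replace l [c] r = l.flatMap (fun x => if x = c then r else [x]) := by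
  have := replace_go_single c r l.length l [] (Nat.le_refl _)
  simpa [PySem.Chars.replace] using this

theorem splitOn_go_dash :
    ∀ (fuel : Nat) (l cur : List Char) (acc : List (List Char)), l.length ≤ fuel →
      PySem.Chars.splitOn.go ['-'] fuel l cur acc
        = acc.reverse ++ (pvSplit l).modifyHead (cur.reverse ++ ·) := by
  intro fuel
  induction fuel with
  | zero =>
    intro l cur acc h
    have hl : l = [] := List.eq_nil_of_length_eq_zero (Nat.le_zero.mp h)
    subst hl
    simp [PySem.Chars.splitOn.go, pvSplit]
  | succ n ih =>
    intro l cur acc h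
    cases l with
    | nil => simp [PySem.Chars.splitOn.go, pvSplit]
    | cons x t =>
      simp only [PySem.Chars.splitOn.go, List.isPrefixOf, Bool.and_true]
      by_cases hx : x = '-'
      · subst hx
        simp only [beq_self_eq_true, if_true, List.length_cons, List.length_nil,
          List.drop_succ_cons, List.drop_zero, Nat.zero_add]
        rw [ih t [] (cur.reverse :: acc) (by simpa using Nat.le_of_succ_le_succ h)]
        simp [pvSplit]
        cases pvSplit t <;> simp
      · have hbe : ('-' == x) = false := by simpa using fun e => hx e.symm
        rw [hbe]
        simp only [Bool.false_eq_true, if_false]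
        rw [ih t (x :: cur) acc (by simpa using Nat.le_of_succ_le_succ h)]
        simp only [pvSplit, if_neg hx]
        cases pvSplit t <;> simp

theorem splitOn_dash (l : List Char) :
    PySem.Chars.splitOn l ['-'] = pvSplit l := by
  have := splitOn_go_dash (l.length + 1) l [] [] (Nat.le_succ _)
  rw [PySem.Chars.splitOn, this]
  cases pvSplit l <;> simp

theorem foldl_replace (nm : List Char) :
    pvSpecials.foldl (fun s p => PySem.Chars.replace s [p.1] ('-' :: p.2)) nm
      = nm.flatMap pvG := by
  simp only [pvSpecials, List.foldl_cons, List.foldl_nil, replace_single, List.flatMap_assoc]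
  congr 1
  funext x
  by_cases h0 : x = ':'
  · subst h0; decide
  by_cases h1 : x = '.'
  · subst h1; decide
  by_cases h2 : x = '+'
  · subst h2; decide
  by_cases h3 : x = '@'
  · subst h3; decide
  by_cases h4 : x = '#'
  · subst h4; decide
  by_cases h5 : x = '$'
  · subst h5; decide
  by_cases h6 : x = '%'
  · subst h6; decide
  by_cases h7 : x = '&'
  · subst h7; decide
  by_cases h8 : x = '!'
  · subst h8; decide
  by_cases h9 : x = '?'
  · subst h9; decide
  by_cases h10 : x = '*'
  · subst h10; decide
  by_cases h11 : x = '/'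
  · subst h11; decide
  by_cases h12 : x = '\\'
  · subst h12; decide
  by_cases h13 : x = '|'
  · subst h13; decide
  by_cases h14 : x = '='
  · subst h14; decide
  by_cases h15 : x = '<'
  · subst h15; decide
  by_cases h16 : x = '>'
  · subst h16; decide
  by_cases h17 : x = '('
  · subst h17; decide
  by_cases h18 : x = ')'
  · subst h18; decide
  by_cases h19 : x = '['
  · subst h19; decide
  by_cases h20 : x = ']'
  · subst h20; decide
  by_cases h21 : x = '{'
  · subst h21; decide
  by_cases h22 : x = '}'
  · subst h22; decide
  by_cases h23 : x = ';'
  · subst h23; decide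
  by_cases h24 : x = ','
  · subst h24; decide
  by_cases h25 : x = '\''
  · subst h25; decide
  by_cases h26 : x = '\"'
  · subst h26; decide
  by_cases h27 : x = '`'
  · subst h27; decide
  by_cases h28 : x = '~'
  · subst h28; decide
  by_cases h29 : x = '^'
  · subst h29; decide
  have e0 : (x == ':') = false := beq_eq_false_iff_ne.mpr h0
  have e1 : (x == '.') = false := beq_eq_false_iff_ne.mpr h1
  have e2 : (x == '+') = false := beq_eq_false_iff_ne.mpr h2
  have e3 : (x == '@') = false := beq_eq_false_iff_ne.mpr h3
  have e4 : (x == '#') = false := beq_eq_false_iff_ne.mpr h4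
  have e5 : (x == '$') = false := beq_eq_false_iff_ne.mpr h5
  have e6 : (x == '%') = false := beq_eq_false_iff_ne.mpr h6
  have e7 : (x == '&') = false := beq_eq_false_iff_ne.mpr h7
  have e8 : (x == '!') = false := beq_eq_false_iff_ne.mpr h8
  have e9 : (x == '?') = false := beq_eq_false_iff_ne.mpr h9
  have e10 : (x == '*') = false := beq_eq_false_iff_ne.mpr h10
  have e11 : (x == '/') = false := beq_eq_false_iff_ne.mpr h11
  have e12 : (x == '\\') = false := beq_eq_false_iff_ne.mpr h12
  have e13 : (x == '|') = false := beq_eq_false_iff_ne.mpr h13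
  have e14 : (x == '=') = false := beq_eq_false_iff_ne.mpr h14
  have e15 : (x == '<') = false := beq_eq_false_iff_ne.mpr h15
  have e16 : (x == '>') = false := beq_eq_false_iff_ne.mpr h16
  have e17 : (x == '(') = false := beq_eq_false_iff_ne.mpr h17
  have e18 : (x == ')') = false := beq_eq_false_iff_ne.mpr h18
  have e19 : (x == '[') = false := beq_eq_false_iff_ne.mpr h19
  have e20 : (x == ']') = false := beq_eq_false_iff_ne.mpr h20
  have e21 : (x == '{') = false := beq_eq_false_iff_ne.mpr h21
  have e22 : (x == '}') = false := beq_eq_false_iff_ne.mpr h22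
  have e23 : (x == ';') = false := beq_eq_false_iff_ne.mpr h23
  have e24 : (x == ',') = false := beq_eq_false_iff_ne.mpr h24
  have e25 : (x == '\'') = false := beq_eq_false_iff_ne.mpr h25
  have e26 : (x == '\"') = false := beq_eq_false_iff_ne.mpr h26
  have e27 : (x == '`') = false := beq_eq_false_iff_ne.mpr h27
  have e28 : (x == '~') = false := beq_eq_false_iff_ne.mpr h28
  have e29 : (x == '^') = false := beq_eq_false_iff_ne.mpr h29
  simp [pvG, pvSpecials, List.lookup, h0, h1, h2, h3, h4, h5, h6, h7, h8, h9, h10, h11, h12, h13, h14, h15, h16, h17, h18, h19, h20, h21, h22, h23, h24, h25, h26, h27, h28, h29, e0, e1, e2, e3, e4, e5, e6, e7, e8, e9, e10, e11, e12, e13, e14, e15, e16, e17, e18, e19, e20, e21, e22, e23, e24, e25, e26, e27, e28, e29]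

theorem lookup_no_dash (c : Char) (v : List Char) (h : pvSpecials.lookup c = some v) :
    '-' ∉ v := by
  simp only [pvSpecials, List.lookup] at h
  repeat' split at h
  all_goals simp_all
  all_goals (subst v; decide)

theorem lookup_not_digit (c : Char) (v : List Char) (h : pvSpecials.lookup c = some v) :
    PySem.Chars.isdigit c = false := by
  simp only [pvSpecials, List.lookup] at h
  repeat' split at h
  all_goals simp_all
  all_goals (subst c; decide)

theorem pvSplit_ne_nil (l : List Char) : pvSplit l ≠ [] := by
  induction l with
  | nil => simp [pvSplit]
  | cons c t ih =>
    simp only [pvSplit]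
    split
    · simp
    · cases h : pvSplit t with
      | nil => exact absurd h ih
      | cons a b => simp

theorem pvSplit_append (a x : List Char) (h : '-' ∉ a) :
    pvSplit (a ++ x) = (pvSplit x).modifyHead (a ++ ·) := by
  induction a with
  | nil => cases hX : pvSplit x <;> simp [hX]
  | cons c t ih =>
    have hc : c ≠ '-' := fun e => h (e ▸ List.mem_cons_self)
    have ht : '-' ∉ t := fun m => h (List.mem_cons_of_mem _ m)
    simp only [List.cons_append, pvSplit, if_neg hc, ih ht]
    cases pvSplit x <;> simp

theorem pvBLoop_eq (l : List Char) :
    ∀ (parts : List (List Char)) (cur : List Char),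
      pvBLoop l parts cur
        = parts ++ (((pvSplit (l.flatMap pvG)).modifyHead (cur ++ ·)).filter (fun p => !p.isEmpty)) := by
  induction l with
  | nil =>
    intro parts cur
    cases cur <;> simp [pvBLoop, pvSplit]
  | cons c t ih =>
    intro parts cur
    by_cases hc : c = '-'
    · subst hc
      have hg : pvG '-' = ['-'] := by decide
      simp only [pvBLoop, List.flatMap_cons, hg]
      rw [ih]
      simp only [List.singleton_append, pvSplit]
      cases hX : pvSplit (t.flatMap pvG) with
      | nil => exact absurd hX (pvSplit_ne_nil _)
      | cons a b => cases cur <;> simp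
    · simp only [pvBLoop, if_neg hc]
      cases hl : pvSpecials.lookup c with
      | some v =>
        have hg : pvG c = '-' :: v := by simp [pvG, hl]
        have hv : '-' ∉ v := lookup_no_dash c v hl
        simp only [List.flatMap_cons, hg]
        rw [ih]
        simp only [List.cons_append, pvSplit, pvSplit_append v _ hv]
        cases hX : pvSplit (t.flatMap pvG) with
        | nil => exact absurd hX (pvSplit_ne_nil _)
        | cons a b => cases cur <;> simp
      | none =>
        have hg : pvG c = [c] := by simp [pvG, hl]
        simp only [List.flatMap_cons, hg]
        rw [ih]
        simp only [List.singleton_append, pvSplit, if_neg hc]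
        cases hX : pvSplit (t.flatMap pvG) with
        | nil => exact absurd hX (pvSplit_ne_nil _)
        | cons a b => cases cur <;> simp

theorem head_digit_flatMap (nm : List Char) :
    (match nm.flatMap pvG with | [] => false | c :: _ => PySem.Chars.isdigit c)
      = (match nm with | [] => false | c :: _ => PySem.Chars.isdigit c) := by
  cases nm with
  | nil => rfl
  | cons c t =>
    simp only [List.flatMap_cons]
    cases hl : pvSpecials.lookup c with
    | some v =>
      have hg : pvG c = '-' :: v := by simp [pvG, hl]
      simp [hg, lookup_not_digit c v hl]
      decide
    | none =>
      have hg : pvG c = [c] := by simp [pvG, hl]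
      simp [hg]

theorem cap_eq (w : List Char) : pvCapB w = pvCapA w := by
  cases w <;> simp [pvCapA, pvCapB, PySem.Chars.upper, PySem.Chars.lower]

-- ===== VERDICT (by name: the statement is the Claim_ definition above) =====
theorem pv_match_getD (o : Option (List Char)) (d : List Char) :
    (match o with | some v => v | none => d) = o.getD d := by
  cases o <;> rfl

theorem pv_capB_eq_capA : pvCapB = pvCapA := funext cap_eq

theorem pv_modifyHead_nil_append (X : List (List Char)) :
    X.modifyHead (fun p => ([] : List Char) ++ p) = X := by
  cases X <;> simp

set_option maxHeartbeats 1000000 in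
theorem svg_filename_to_component_name_spec : Claim_equal_svg_filename_to_component_name := by
  intro filename _
  unfold Spec_svg_filename_to_component_name
  simp only [svg_filename_to_component_name, svg_filename_to_component_name_alt]
  generalize (PySem.Chars.replace (PySem.Chars.replace filename.toList ".svg".toList [])
      "-stroke-standard".toList []) = n0
  rw [pv_match_getD]
  generalize (pvConflicts.lookup n0).getD n0 = nm
  rw [foldl_replace nm, splitOn_dash, head_digit_flatMap, pv_capB_eq_capA, pvBLoop_eq nm [] [],
    List.nil_append, pv_modifyHead_nil_append]
  by_cases hd : (match nm with | [] => false | c :: _ => PySem.Chars.isdigit c) = true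
  · rw [if_pos hd, if_pos hd]
    cases nm with
    | nil => simp at hd
    | cons c t =>
      have hdig : PySem.Chars.isdigit c = true := hd
      have hnone : pvSpecials.lookup c = none := by
        cases hl : pvSpecials.lookup c with
        | none => rfl
        | some v => exact absurd hdig (by simp [lookup_not_digit c v hl])
      have hcdash : c ≠ '-' := by intro e; subst e; exact absurd hdig (by decide)
      have hg : pvG c = [c] := by simp [pvG, hnone]
      simp only [List.flatMap_cons, hg, List.singleton_append, pvSplit, if_neg hcdash]
      cases hX : pvSplit (t.flatMap pvG) with
      | nil => exact absurd hX (pvSplit_ne_nil _)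
      | cons a bs =>
        rw [pvSplit_append _ _ (by decide : '-' ∉ "Num".toList)]
        simp [pvSplit, if_neg hcdash, hX]
  · rw [if_neg hd, if_neg hd]
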